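-- pv_equiv track=rewrite | github.com/gedePakusadewa/learning-math-problem-solving | 13_poject_eular/q.py | f_v
-- ===== SOURCE A (Python) =====
-- def find_value_vertically(data, row, col, nDiagonal):
--     total = -8888888
--     lgc = len(data[0])
--     lgr = len(data)
--
--     if (row + nDiagonal) <= lgr:
--         total = 1
--         for x in range(nDiagonal):
--             total = total * data[row + x][col]
--     return total
--
-- def f_v(data, nNumber):
--     tempBe = 0
--     tempAf = 0
--     total = 1
--     lgc = len(data[0])
--     lgr = len(data)
--     for row in range(lgr):
--         for col in range(lgc):
--             total = find_value_vertically(data, row, col, nNumber)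
--             if total > tempBe:
--                 tempBe = total
--                 total = 0
--     return tempBe
-- ===== SOURCE B (Python) =====
-- def f_v(data, nNumber):
--     # Per-column sliding window: keep the product of the window's nonzero
--     # entries and a count of its zeros, updating them as the window slides.
--     lgr = len(data)
--     lgc = len(data[0])
--     if nNumber <= 0:
--         # an empty window has product 1, attained at every cell position (if any)
--         return 1 if lgc > 0 else 0
--     best = 0
--     for col in range(lgc):
--         zeros = 0
--         prod = 1
--         for row in range(lgr):
--             v = data[row][col]
--             if v == 0:
--                 zeros += 1
--             else:
--                 prod *= v
--             if row >= nNumber: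
--                 u = data[row - nNumber][col]
--                 if u == 0:
--                     zeros -= 1
--                 else:
--                     prod //= u
--             if row >= nNumber - 1 and zeros == 0 and prod > best:
--                 best = prod
--     return best
-- ===== Notes on version B (the rewrite author's own statement) =====
-- stated objective: alternative
-- what changed: A recomputes each vertical n-window product from scratch for every cell; B instead makes one pass per column with a sliding window that maintains the count of zeros and the running product of the nonzero entries, dividing out the entry that leaves the window.
-- outside the precondition, e.g. on f_v([[1, 2], [3]], 5): A returns 0, B raises IndexError
import Mathlib
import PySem

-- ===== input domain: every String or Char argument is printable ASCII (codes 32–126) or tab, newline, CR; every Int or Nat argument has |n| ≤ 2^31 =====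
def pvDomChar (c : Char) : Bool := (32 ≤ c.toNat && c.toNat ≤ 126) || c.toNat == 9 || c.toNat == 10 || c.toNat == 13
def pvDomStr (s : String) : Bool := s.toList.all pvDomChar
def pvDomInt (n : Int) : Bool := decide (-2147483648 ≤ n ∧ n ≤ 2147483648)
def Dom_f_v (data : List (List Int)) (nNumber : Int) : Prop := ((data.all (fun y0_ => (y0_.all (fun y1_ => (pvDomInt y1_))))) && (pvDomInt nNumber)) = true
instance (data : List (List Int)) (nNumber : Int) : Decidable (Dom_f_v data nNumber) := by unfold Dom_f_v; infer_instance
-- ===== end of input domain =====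

-- B replaces A's per-cell recomputation of each vertical n-window by a per-column sliding
-- window (zero count + running product of nonzero entries), touching each cell O(1) times.

-- ===== PORT A =====
def find_value_vertically (data : List (List Int)) (row : Int) (col : Int) (nDiagonal : Int) : Int :=
  let total : Int := -8888888
  let lgr : Int := data.length
  if row + nDiagonal ≤ lgr then
    (PySem.List.pyRange 0 nDiagonal 1).foldl
      (fun total x => total * PySem.List.pyGetD (PySem.List.pyGetD data (row + x) []) col 0) 1
  else total

def f_v (data : List (List Int)) (nNumber : Int) : Int :=
  let lgc : Int := ((PySem.List.pyGetD data 0 []).length : Int)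
  let lgr : Int := (data.length : Int)
  ((PySem.List.pyRange 0 lgr 1).foldl (fun (st : Int × Int) row =>
      (PySem.List.pyRange 0 lgc 1).foldl (fun (st : Int × Int) col =>
        let total := find_value_vertically data row col nNumber
        if st.1 < total then (total, (0 : Int)) else (st.1, total)) st) ((0 : Int), (1 : Int))).1

-- ===== PORT B =====
def f_v_alt (data : List (List Int)) (nNumber : Int) : Int :=
  let lgr : Int := (data.length : Int)
  let lgc : Int := ((PySem.List.pyGetD data 0 []).length : Int)
  if nNumber ≤ 0 then (if 0 < lgc then 1 else 0)
  else
    (PySem.List.pyRange 0 lgc 1).foldl (fun best col =>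
      ((PySem.List.pyRange 0 lgr 1).foldl (fun (st : Int × Int × Int) row =>
          let v := PySem.List.pyGetD (PySem.List.pyGetD data row []) col 0
          let zp : Int × Int := if v = 0 then (st.1 + 1, st.2.1) else (st.1, st.2.1 * v)
          let zp2 : Int × Int :=
            if nNumber ≤ row then
              (let u := PySem.List.pyGetD (PySem.List.pyGetD data (row - nNumber) []) col 0
               if u = 0 then (zp.1 - 1, zp.2) else (zp.1, PySem.Int.floordiv zp.2 u))
            else zp
          let best' : Int :=
            if nNumber - 1 ≤ row ∧ zp2.1 = 0 ∧ st.2.2 < zp2.2 then zp2.2 else st.2.2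
          (zp2.1, zp2.2, best')) ((0 : Int), (1 : Int), best)).2.2) 0

-- ===== PRECONDITION & SPEC =====
-- Pre_ excludes the inputs on which the Python raises IndexError: the empty grid (A's len(data[0]))
-- and, for a positive window size, ragged grids whose later rows are shorter than the first row
-- (A raises there whenever nNumber ≤ len(data); when nNumber > len(data) A returns 0 without
-- reading any cell while B's full column scan raises, so those ragged grids are excluded too).
def Pre_f_v (data : List (List Int)) (nNumber : Int) : Prop :=
  data ≠ [] ∧ (1 ≤ nNumber → ∀ row ∈ data, (data.headD []).length ≤ row.length)
instance (data : List (List Int)) (nNumber : Int) : Decidable (Pre_f_v data nNumber) := by unfold Pre_f_v; infer_instance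
def pvWitness_f_v : List (List Int) × Int := ([[1, 2], [3, 4], [5, 0]], 2)

def Spec_f_v (data : List (List Int)) (nNumber : Int) (out : Int) : Prop := out = f_v_alt data nNumber
instance (data : List (List Int)) (nNumber : Int) (out : Int) : Decidable (Spec_f_v data nNumber out) := by unfold Spec_f_v; infer_instance

-- ===== CLAIM (what is proved, stated in full; the proofs are below) =====
def Claim_equal_f_v : Prop := ∀ (data : List (List Int)) (nNumber : Int), Dom_f_v data nNumber → Pre_f_v data nNumber → Spec_f_v data nNumber (f_v data nNumber)

-- ===== LEMMAS AND PROOFS =====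

-- the (c)-th column entry of row i, with Python's defaults replaced by 0 / [] (never hit on Pre_)
def colf (data : List (List Int)) (c : Nat) (i : Nat) : Int := (data.getD i []).getD c 0
-- product of the vertical window of length N starting at row s, in column c
def wprod (data : List (List Int)) (c : Nat) (N : Nat) (s : Nat) : Int :=
  ((List.range' s N).map (colf data c)).prod
-- number of zeros of a list, as an Int
def czv (l : List Int) : Int := (l.count 0 : Int)
-- product of the nonzero entries of a list
def pnz (l : List Int) : Int := (l.filter (· ≠ 0)).prod
-- the partial window after the first t rows of a column have been consumed
def win (data : List (List Int)) (c : Nat) (N : Nat) (t : Nat) : List Int :=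
  (List.range' (t - N) (t - (t - N))).map (colf data c)

lemma czv_append_singleton (l : List Int) (x : Int) :
    czv (l ++ [x]) = czv l + (if x = 0 then 1 else 0) := by
  by_cases h : x = 0 <;> simp [czv, List.count_append, List.count_singleton, h]

lemma czv_cons (x : Int) (l : List Int) :
    czv (x :: l) = (if x = 0 then 1 else 0) + czv l := by
  by_cases h : x = 0 <;> simp [czv, List.count_cons, h] <;> omega

lemma pnz_append_singleton (l : List Int) (x : Int) :
    pnz (l ++ [x]) = pnz l * (if x = 0 then 1 else x) := by
  by_cases h : x = 0 <;> simp [pnz, List.filter_append, h]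

lemma pnz_cons (x : Int) (l : List Int) :
    pnz (x :: l) = (if x = 0 then 1 else x) * pnz l := by
  by_cases h : x = 0 <;> simp [pnz, List.filter_cons, h]

lemma fdiv_exact (u m : Int) (hu : u ≠ 0) : PySem.Int.floordiv (u * m) u = m := by
  have h0 : PySem.Int.mod (u * m) u = 0 := (PySem.Int.mod_eq_zero_iff_dvd _ _).2 ⟨m, rfl⟩
  have h1 := PySem.Int.floordiv_mul_add_mod (u * m) u
  rw [h0, add_zero] at h1
  have : PySem.Int.floordiv (u * m) u * u = m * u := by rw [h1]; ring
  exact mul_right_cancel₀ hu this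

lemma foldl_max_all_le (l : List Int) : ∀ b : Int, (∀ x ∈ l, x ≤ b) → l.foldl max b = b := by
  induction l with
  | nil => intro b _; rfl
  | cons x t ih =>
    intro b h
    have hx : x ≤ b := h x (by simp)
    simp only [List.foldl_cons, max_eq_left hx]
    exact ih b (fun y hy => h y (by simp [hy]))

lemma foldl_max_out (l : List Int) : ∀ b x : Int, l.foldl max (max b x) = max (l.foldl max b) x := by
  induction l with
  | nil => intro b x; rfl
  | cons y t ih =>
    intro b x
    simp only [List.foldl_cons]
    rw [max_right_comm b x y, ih]

lemma foldl_foldl_max_comm (l1 : List Int) : ∀ (l2 : List Int) (b : Int),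
    l2.foldl max (l1.foldl max b) = l1.foldl max (l2.foldl max b) := by
  induction l1 with
  | nil => intro l2 b; rfl
  | cons x t ih =>
    intro l2 b
    simp only [List.foldl_cons]
    rw [ih, foldl_max_out]

lemma foldl_max_flatMap_cons {γ : Type} (l2 : List γ) (x : γ → Int) (ys : γ → List Int) :
    ∀ b : Int, (l2.flatMap (fun c => x c :: ys c)).foldl max b
      = (l2.flatMap ys).foldl max ((l2.map x).foldl max b) := by
  induction l2 with
  | nil => intro b; rfl
  | cons c t ih =>
    intro b
    simp only [List.flatMap_cons, List.map_cons, List.foldl_cons, List.foldl_append]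
    rw [ih, foldl_foldl_max_comm (ys c)]

lemma foldl_max_swap {γ δ : Type} (g : γ → δ → Int) (l1 : List γ) :
    ∀ (l2 : List δ) (b : Int),
      (l1.flatMap (fun r => l2.map (g r))).foldl max b
        = (l2.flatMap (fun c => l1.map (fun r => g r c))).foldl max b := by
  induction l1 with
  | nil =>
    intro l2 b
    have h : l2.flatMap (fun _ : δ => ([] : List Int)) = [] := by
      induction l2 with
      | nil => rfl
      | cons c t ih2 => simpa using ih2
    simp [h]
  | cons r t ih =>
    intro l2 b
    simp only [List.flatMap_cons, List.foldl_append, List.map_cons]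
    rw [ih, foldl_max_flatMap_cons]

-- A's running-max state: only the first component matters
lemma foldA {ν : Type} (val : ν → Int) (L : List ν) :
    ∀ st : Int × Int,
      (L.foldl (fun st x => let t := val x; if st.1 < t then (t, (0:Int)) else (st.1, t)) st).1
        = (L.map val).foldl max st.1 := by
  induction L with
  | nil => intro st; rfl
  | cons x t ih =>
    intro st
    simp only [List.foldl_cons, List.map_cons]
    rw [ih]
    by_cases h : st.1 < val x
    · simp [h, max_eq_right (le_of_lt h)]
    · simp [h, max_eq_left (le_of_not_gt h)]

lemma foldA_nested {ν κ : Type} (val : ν → κ → Int) (rows : List ν) (cols : List κ) :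
    ∀ st : Int × Int,
      (rows.foldl (fun st r => cols.foldl
          (fun st c => let t := val r c; if st.1 < t then (t, (0:Int)) else (st.1, t)) st) st).1
        = (rows.flatMap (fun r => cols.map (val r))).foldl max st.1 := by
  induction rows with
  | nil => intro st; rfl
  | cons r t ih =>
    intro st
    simp only [List.foldl_cons, List.flatMap_cons, List.foldl_append]
    rw [ih, foldA (val r) cols st]

-- the value A computes for cell (r, c)
lemma prodloop (data : List (List Int)) (c : Nat) (r : Nat) :
    ∀ N : Nat, (List.range N).foldl (fun t x => t * colf data c (r + x)) 1
      = wprod data c N r := by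
  intro N
  induction N with
  | zero => simp [wprod]
  | succ N ih =>
    rw [List.range_succ, List.foldl_append, ih]
    unfold wprod
    rw [List.range'_concat, List.map_append, List.prod_append]
    simp

lemma fvv_eq (data : List (List Int)) (nNumber : Int) (r c : Nat) :
    find_value_vertically data (r : Int) (c : Int) nNumber
      = if (r : Int) + nNumber ≤ (data.length : Int)
        then (if nNumber ≤ 0 then 1 else wprod data c nNumber.toNat r)
        else -8888888 := by
  unfold find_value_vertically
  by_cases hv : (r : Int) + nNumber ≤ (data.length : Int)
  · simp only [hv, if_true]
    by_cases hn : nNumber ≤ 0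
    · rw [PySem.List.pyRange_one_eq_nil hn]
      simp [hn]
    · obtain ⟨N, rfl⟩ : ∃ N : Nat, nNumber = (N : Int) := ⟨nNumber.toNat, by omega⟩
      rw [PySem.List.pyRange_zero_natCast, List.foldl_map]
      simp only [← Nat.cast_add, PySem.List.pyGetD_natCast, Int.toNat_natCast, if_neg hn]
      exact prodloop data c r N
  · simp [hv]

-- the single best-update step, once the window state is known
lemma bestStep (W : List Int) (bt : Int) (hb : 0 ≤ bt) :
    (if czv W = 0 ∧ bt < pnz W then pnz W else bt) = max bt W.prod := by
  by_cases hz : czv W = 0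
  · have hcnt : W.count 0 = 0 := by simpa [czv, Int.natCast_eq_zero] using hz
    have h0 : (0 : Int) ∉ W := List.count_eq_zero.1 hcnt
    have hf : W.filter (· ≠ 0) = W := by
      rw [List.filter_eq_self]
      intro a ha
      simp only [ne_eq, decide_eq_true_eq]
      intro h; exact h0 (h ▸ ha)
    have hp : pnz W = W.prod := by rw [pnz, hf]
    by_cases hlt : bt < pnz W
    · rw [if_pos ⟨hz, hlt⟩, hp]
      exact (max_eq_right (le_of_lt (hp ▸ hlt))).symm
    · rw [if_neg (by tauto), max_eq_left (by rw [← hp]; exact le_of_not_gt hlt)]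
  · have hcnt : W.count 0 ≠ 0 := fun h => hz (by simp [czv, h])
    have h0 : (0 : Int) ∈ W := List.count_pos_iff.1 (Nat.pos_of_ne_zero hcnt)
    rw [if_neg (by tauto), List.prod_eq_zero h0, max_eq_left hb]

lemma range'_split_head (s n : Nat) (hn : 1 ≤ n) :
    List.range' s n = s :: List.range' (s + 1) (n - 1) := by
  conv_lhs => rw [show n = (n - 1) + 1 from by omega]
  rw [List.range'_succ]

lemma range'_split_last (s n : Nat) (hn : 1 ≤ n) :
    List.range' s n = List.range' s (n - 1) ++ [s + (n - 1)] := by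
  conv_lhs => rw [show n = (n - 1) + 1 from by omega]
  rw [List.range'_concat]
  simp

-- B's sliding-window step, on Nat row indices
def bstep (data : List (List Int)) (c : Nat) (N : Nat) (st : Int × Int × Int) (tn : Nat) : Int × Int × Int :=
  let v := colf data c tn
  let u := colf data c (tn - N)
  let z' : Int := if N ≤ tn then st.1 + (if v = 0 then 1 else 0) - (if u = 0 then 1 else 0)
                  else st.1 + (if v = 0 then 1 else 0)
  let p1 : Int := if v = 0 then st.2.1 else st.2.1 * v
  let p' : Int := if N ≤ tn then (if u = 0 then p1 else PySem.Int.floordiv p1 u) else p1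
  let b' : Int := if N - 1 ≤ tn ∧ z' = 0 ∧ st.2.2 < p' then p' else st.2.2
  (z', p', b')

lemma bstep_slide (data : List (List Int)) (c : Nat) (N : Nat) (hN : 1 ≤ N) (t : Nat)
    (hNt : N ≤ t) (bt : Int) (hbt : 0 ≤ bt) :
    bstep data c N (czv (win data c N t), pnz (win data c N t), bt) t
      = (czv (win data c N (t + 1)), pnz (win data c N (t + 1)),
         max bt (wprod data c N (t - (N - 1)))) := by
  have hrange : List.range' (t - N + 1) N = List.range' (t - N + 1) (N - 1) ++ [t] := by
    rw [range'_split_last _ _ hN, show t - N + 1 + (N - 1) = t from by omega]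
  have hWt : win data c N t
      = colf data c (t - N) :: (List.range' (t - N + 1) (N - 1)).map (colf data c) := by
    unfold win
    rw [show t - (t - N) = N from by omega, range'_split_head _ _ hN]
    simp
  have hWt1 : win data c N (t + 1)
      = (List.range' (t - N + 1) (N - 1)).map (colf data c) ++ [colf data c t] := by
    unfold win
    rw [show t + 1 - N = t - N + 1 from by omega,
        show t + 1 - (t - N + 1) = N from by omega, hrange]
    simp
  have hprod : (win data c N (t + 1)).prod = wprod data c N (t - (N - 1)) := by
    rw [hWt1]
    unfold wprod
    rw [show t - (N - 1) = t - N + 1 from by omega, hrange]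
    simp
  have hz1 : czv (win data c N t)
      = (if colf data c (t - N) = 0 then 1 else 0)
        + czv ((List.range' (t - N + 1) (N - 1)).map (colf data c)) := by
    rw [hWt, czv_cons]
  have hz2 : czv (win data c N (t + 1))
      = czv ((List.range' (t - N + 1) (N - 1)).map (colf data c))
        + (if colf data c t = 0 then 1 else 0) := by
    rw [hWt1, czv_append_singleton]
  have hp1 : pnz (win data c N t)
      = (if colf data c (t - N) = 0 then 1 else colf data c (t - N))
        * pnz ((List.range' (t - N + 1) (N - 1)).map (colf data c)) := by
    rw [hWt, pnz_cons]
  have hp2 : pnz (win data c N (t + 1))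
      = pnz ((List.range' (t - N + 1) (N - 1)).map (colf data c))
        * (if colf data c t = 0 then 1 else colf data c t) := by
    rw [hWt1, pnz_append_singleton]
  have hza : (bstep data c N (czv (win data c N t), pnz (win data c N t), bt) t).1
      = czv (win data c N (t + 1)) := by
    show (if N ≤ t then _ + _ - _ else _ + _) = _
    rw [if_pos hNt, hz1, hz2]
    by_cases hu : colf data c (t - N) = 0 <;> by_cases hv : colf data c t = 0 <;>
      simp only [hu, hv, if_true, if_false, ite_true, ite_false] <;> ring
  have hpa : (bstep data c N (czv (win data c N t), pnz (win data c N t), bt) t).2.1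
      = pnz (win data c N (t + 1)) := by
    show (if N ≤ t then _ else _) = _
    rw [if_pos hNt, hp1, hp2]
    by_cases hu : colf data c (t - N) = 0 <;> by_cases hv : colf data c t = 0 <;>
      simp only [hu, hv, if_true, if_false, ite_true, ite_false]
    · simp
    · simp [mul_comm]
    · rw [fdiv_exact _ _ hu, mul_one]
    · rw [mul_assoc, fdiv_exact _ _ hu]
  have hba : (bstep data c N (czv (win data c N t), pnz (win data c N t), bt) t).2.2
      = max bt (wprod data c N (t - (N - 1))) := by
    have hdef : (bstep data c N (czv (win data c N t), pnz (win data c N t), bt) t).2.2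
        = if N - 1 ≤ t
            ∧ (bstep data c N (czv (win data c N t), pnz (win data c N t), bt) t).1 = 0
            ∧ bt < (bstep data c N (czv (win data c N t), pnz (win data c N t), bt) t).2.1
          then (bstep data c N (czv (win data c N t), pnz (win data c N t), bt) t).2.1
          else bt := rfl
    rw [hdef, hza, hpa]
    have hc : N - 1 ≤ t := by omega
    simp only [hc, true_and]
    rw [bestStep (win data c N (t + 1)) bt hbt, hprod]
  have hsplit : bstep data c N (czv (win data c N t), pnz (win data c N t), bt) t
      = ((bstep data c N (czv (win data c N t), pnz (win data c N t), bt) t).1,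
         (bstep data c N (czv (win data c N t), pnz (win data c N t), bt) t).2.1,
         (bstep data c N (czv (win data c N t), pnz (win data c N t), bt) t).2.2) := rfl
  rw [hsplit, hza, hpa, hba]

lemma bstep_grow (data : List (List Int)) (c : Nat) (N : Nat) (hN : 1 ≤ N) (t : Nat)
    (hNt : t < N) (bt : Int) (hbt : 0 ≤ bt) :
    bstep data c N (czv (win data c N t), pnz (win data c N t), bt) t
      = (czv (win data c N (t + 1)), pnz (win data c N (t + 1)),
         if N - 1 ≤ t then max bt (wprod data c N 0) else bt) := by
  have hnle : ¬ N ≤ t := by omega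
  have hWt : win data c N t = (List.range' 0 t).map (colf data c) := by
    unfold win
    rw [show t - N = 0 from by omega, show t - 0 = t from by omega]
  have hWt1 : win data c N (t + 1) = win data c N t ++ [colf data c t] := by
    unfold win
    rw [show t + 1 - N = 0 from by omega, show t + 1 - 0 = t + 1 from by omega,
        show t - N = 0 from by omega, show t - 0 = t from by omega, List.range'_concat]
    simp
  have hza : (bstep data c N (czv (win data c N t), pnz (win data c N t), bt) t).1
      = czv (win data c N (t + 1)) := by
    show (if N ≤ t then _ + _ - _ else _ + _) = _
    rw [if_neg hnle, hWt1, czv_append_singleton]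
  have hpa : (bstep data c N (czv (win data c N t), pnz (win data c N t), bt) t).2.1
      = pnz (win data c N (t + 1)) := by
    show (if N ≤ t then _ else _) = _
    rw [if_neg hnle, hWt1, pnz_append_singleton]
    by_cases hv : colf data c t = 0 <;> simp [hv]
  have hba : (bstep data c N (czv (win data c N t), pnz (win data c N t), bt) t).2.2
      = if N - 1 ≤ t then max bt (wprod data c N 0) else bt := by
    have hdef : (bstep data c N (czv (win data c N t), pnz (win data c N t), bt) t).2.2
        = if N - 1 ≤ t
            ∧ (bstep data c N (czv (win data c N t), pnz (win data c N t), bt) t).1 = 0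
            ∧ bt < (bstep data c N (czv (win data c N t), pnz (win data c N t), bt) t).2.1
          then (bstep data c N (czv (win data c N t), pnz (win data c N t), bt) t).2.1
          else bt := rfl
    rw [hdef, hza, hpa]
    by_cases hc : N - 1 ≤ t
    · have hprod : (win data c N (t + 1)).prod = wprod data c N 0 := by
        rw [hWt1, hWt]
        unfold wprod
        rw [show List.range' 0 N = List.range' 0 t ++ [t] from by
          rw [show N = t + 1 from by omega, List.range'_concat]
          simp]
        simp
      rw [if_pos hc]; simp only [hc, true_and]
      rw [bestStep (win data c N (t + 1)) bt hbt, hprod]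
    · simp [hc]
  have hsplit : bstep data c N (czv (win data c N t), pnz (win data c N t), bt) t
      = ((bstep data c N (czv (win data c N t), pnz (win data c N t), bt) t).1,
         (bstep data c N (czv (win data c N t), pnz (win data c N t), bt) t).2.1,
         (bstep data c N (czv (win data c N t), pnz (win data c N t), bt) t).2.2) := rfl
  rw [hsplit, hza, hpa, hba]

-- B's inner sliding-window invariant
lemma inner_inv (data : List (List Int)) (c : Nat) (N : Nat) (hN : 1 ≤ N) (b : Int) (hb : 0 ≤ b) :
    ∀ t : Nat,
      (List.range t).foldl (bstep data c N) ((0 : Int), (1 : Int), b)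
      = (czv (win data c N t), pnz (win data c N t),
         ((List.range (t - (N - 1))).map (wprod data c N)).foldl max b) := by
  intro t
  induction t with
  | zero => simp [win, czv, pnz]
  | succ t ih =>
    rw [List.range_succ, List.foldl_append, ih]
    simp only [List.foldl_cons, List.foldl_nil]
    have hbt : 0 ≤ ((List.range (t - (N - 1))).map (wprod data c N)).foldl max b :=
      le_trans hb (PySem.List.le_foldl_max _ b).1
    by_cases hNt : N ≤ t
    · rw [bstep_slide data c N hN t hNt _ hbt,
          show t + 1 - (N - 1) = (t - (N - 1)) + 1 from by omega,
          List.range_succ, List.map_append, List.foldl_append]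
      simp
    · rw [bstep_grow data c N hN t (by omega) _ hbt]
      by_cases hc : N - 1 ≤ t
      · rw [show t - (N - 1) = 0 from by omega, show t + 1 - (N - 1) = 1 from by omega]
        simp [hc]
      · rw [show t - (N - 1) = 0 from by omega, show t + 1 - (N - 1) = 0 from by omega]
        simp [hc]

-- two folds agree if the step functions agree
lemma foldl_ext {α β : Type} (f g : β → α → β) (l : List α)
    (h : ∀ st a, a ∈ l → f st a = g st a) : ∀ b : β, l.foldl f b = l.foldl g b := by
  induction l with
  | nil => intro b; rfl
  | cons x t ih =>
    intro b
    simp only [List.foldl_cons]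
    rw [h b x (by simp)]
    exact ih (fun st a ha => h st a (by simp [ha])) _

lemma flatMap_congr' {α β : Type} (l : List α) (f g : α → List β)
    (h : ∀ a ∈ l, f a = g a) : l.flatMap f = l.flatMap g := by
  induction l with
  | nil => rfl
  | cons x t ih =>
    simp only [List.flatMap_cons]
    rw [h x (by simp), ih (fun a ha => h a (by simp [ha]))]

lemma foldl_max_le (l : List Int) : ∀ b m : Int, b ≤ m → (∀ x ∈ l, x ≤ m) → l.foldl max b ≤ m := by
  induction l with
  | nil => intro b m hb _; exact hb
  | cons x t ih =>
    intro b m hb h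
    simp only [List.foldl_cons]
    exact ih _ m (max_le hb (h x (by simp))) (fun y hy => h y (by simp [hy]))

-- a fold of per-element maximisations is a max over the flattened list
lemma foldl_flatMap_max {γ : Type} (F : Int → γ → Int) (g : γ → List Int)
    (hF : ∀ b c, 0 ≤ b → F b c = (g c).foldl max b) (l : List γ) :
    ∀ b : Int, 0 ≤ b → l.foldl F b = (l.flatMap g).foldl max b := by
  induction l with
  | nil => intro b _; rfl
  | cons c t ih =>
    intro b hb
    simp only [List.foldl_cons, List.flatMap_cons, List.foldl_append]
    rw [hF b c hb]
    exact ih _ (le_trans hb (PySem.List.le_foldl_max _ b).1)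

-- A as a max over the row-major list of per-cell values
lemma A_eq (data : List (List Int)) (n : Int) :
    f_v data n
      = ((List.range data.length).flatMap (fun (r : Nat) =>
          (List.range (data.getD 0 []).length).map (fun (c : Nat) =>
            if (r : Int) + n ≤ (data.length : Int)
            then (if n ≤ 0 then 1 else wprod data c n.toNat r)
            else -8888888))).foldl max 0 := by
  unfold f_v
  rw [PySem.List.pyGetD_zero]
  simp only [PySem.List.pyRange_zero_natCast]
  rw [foldA_nested (fun (ri ci : Int) => find_value_vertically data ri ci n)
      ((List.range data.length).map Nat.cast) ((List.range (data.getD 0 []).length).map Nat.cast)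
      ((0 : Int), (1 : Int))]
  rw [List.flatMap_map]
  congr 1
  apply flatMap_congr'
  intro r _
  rw [List.map_map]
  apply List.map_congr_left
  intro c _
  exact fvv_eq data n r c

-- B as a max over the column-major list of window products
lemma B_eq (data : List (List Int)) (N : Nat) (hN : 1 ≤ N) :
    f_v_alt data (N : Int)
      = ((List.range (data.getD 0 []).length).flatMap (fun c =>
          (List.range (data.length - (N - 1))).map (wprod data c N))).foldl max 0 := by
  unfold f_v_alt
  rw [PySem.List.pyGetD_zero, if_neg (by push_cast; omega)]
  simp only [PySem.List.pyRange_zero_natCast, List.foldl_map]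
  refine foldl_flatMap_max _ _ ?_ (List.range (data.getD 0 []).length) 0 le_rfl
  intro b c hb
  rw [foldl_ext _ (bstep data c N) (List.range data.length) ?_,
      inner_inv data c N hN b hb data.length]
  intro st tn _
  simp only [PySem.List.pyGetD_natCast]
  have hcond : ((N : Int) - 1 ≤ (tn : Int)) = (N - 1 ≤ tn) := propext (by omega)
  by_cases htn : N ≤ tn
  · rw [if_pos (show (N : Int) ≤ (tn : Int) from by exact_mod_cast htn),
        show (tn : Int) - (N : Int) = ((tn - N : Nat) : Int) from by omega]
    simp only [PySem.List.pyGetD_natCast]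
    by_cases hv : (data.getD tn []).getD c 0 = 0 <;>
      by_cases hu : (data.getD (tn - N) []).getD c 0 = 0 <;>
        simp only [bstep, colf, hv, hu, htn, hcond, if_true, if_false, ite_true, ite_false,
          if_pos htn] <;>
      refine congrArg₂ _ (by ring) (congrArg₂ _ rfl ?_) <;>
      first
        | rfl
        | simp only [add_zero, sub_zero]
  · rw [if_neg (show ¬ (N : Int) ≤ (tn : Int) from by exact_mod_cast htn)]
    by_cases hv : (data.getD tn []).getD c 0 = 0 <;>
      simp only [bstep, colf, hv, htn, hcond, if_true, if_false, ite_true, ite_false,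
        if_neg htn] <;>
      refine congrArg₂ _ (by ring) (congrArg₂ _ rfl ?_) <;>
      first
        | rfl
        | simp only [add_zero, sub_zero]

lemma flatMap_const_nil {α β : Type} (l : List α) : l.flatMap (fun _ => ([] : List β)) = [] := by
  induction l with
  | nil => rfl
  | cons x t ih => simpa using ih

-- the whole file's main equality, with no precondition at all (the Lean ports are total)
lemma main_eq (data : List (List Int)) (nNumber : Int) : f_v data nNumber = f_v_alt data nNumber := by
  by_cases hn : nNumber ≤ 0
  · -- empty window: every cell contributes the empty product 1
    rw [A_eq]
    unfold f_v_alt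
    rw [PySem.List.pyGetD_zero, if_pos hn]
    have hlist : (List.range data.length).flatMap (fun (r : Nat) =>
          (List.range (data.getD 0 []).length).map (fun (c : Nat) =>
            if (r : Int) + nNumber ≤ (data.length : Int)
            then (if nNumber ≤ 0 then 1 else wprod data c nNumber.toNat r)
            else -8888888))
        = (List.range data.length).flatMap (fun _ =>
            (List.range (data.getD 0 []).length).map (fun _ => (1 : Int))) := by
      apply flatMap_congr'
      intro r hr
      apply List.map_congr_left
      intro c _
      rw [if_pos (by simp only [List.mem_range] at hr; omega), if_pos hn]
    rw [hlist]
    by_cases hC : (data.getD 0 []).length = 0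
    · rw [hC]
      simp only [List.range_zero, List.map_nil, flatMap_const_nil, List.foldl_nil]
      simp
    · have hCpos : 0 < (data.getD 0 []).length := Nat.pos_of_ne_zero hC
      have hRpos : 0 < data.length := by
        cases data with
        | nil => simp at hC
        | cons _ _ => simp
      have hmem : (1 : Int) ∈ (List.range data.length).flatMap (fun _ =>
          (List.range (data.getD 0 []).length).map (fun _ => (1 : Int))) :=
        List.mem_flatMap.2 ⟨0, List.mem_range.2 hRpos,
          List.mem_map.2 ⟨0, List.mem_range.2 hCpos, rfl⟩⟩
      have hle := foldl_max_le ((List.range data.length).flatMap (fun _ =>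
          (List.range (data.getD 0 []).length).map (fun _ => (1 : Int)))) 0 1 (by norm_num)
        (fun x hx => by
          obtain ⟨r, _, hx2⟩ := List.mem_flatMap.1 hx
          obtain ⟨c, _, rfl⟩ := List.mem_map.1 hx2
          exact le_refl 1)
      have hge := (PySem.List.le_foldl_max ((List.range data.length).flatMap (fun _ =>
          (List.range (data.getD 0 []).length).map (fun _ => (1 : Int)))) 0).2 1 hmem
      rw [if_pos (by exact_mod_cast hCpos)]
      omega
  · obtain ⟨N, rfl⟩ : ∃ N : Nat, nNumber = (N : Int) := ⟨nNumber.toNat, by omega⟩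
    have hN : 1 ≤ N := by omega
    rw [A_eq, B_eq data N hN]
    simp only [Int.toNat_natCast, if_neg hn]
    set R := data.length with hR
    set C := (data.getD 0 []).length with hC
    set K := R - (N - 1) with hK
    have hsplit : List.range R = List.range K ++ (List.range (R - K)).map (fun x => K + x) := by
      conv_lhs => rw [show R = K + (R - K) from by omega]
      rw [List.range_add]
    rw [hsplit, List.flatMap_append, List.foldl_append]
    have htail : ∀ x ∈ ((List.range (R - K)).map (fun x => K + x)).flatMap (fun (r : Nat) =>
        (List.range C).map (fun (c : Nat) =>
          if (r : Int) + (N : Int) ≤ (R : Int) then wprod data c N r else -8888888)), x ≤ 0 := by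
      intro x hx
      obtain ⟨r, hr, hx2⟩ := List.mem_flatMap.1 hx
      obtain ⟨c, _, rfl⟩ := List.mem_map.1 hx2
      obtain ⟨j, hj, rfl⟩ := List.mem_map.1 hr
      rw [if_neg (by simp only [List.mem_range] at hj; omega)]
      norm_num
    rw [foldl_max_all_le _ _
      (fun x hx => le_trans (htail x hx) (PySem.List.le_foldl_max _ 0).1)]
    have hhead : (List.range K).flatMap (fun (r : Nat) => (List.range C).map (fun (c : Nat) =>
          if (r : Int) + (N : Int) ≤ (R : Int) then wprod data c N r else -8888888))
        = (List.range K).flatMap (fun (r : Nat) => (List.range C).map (fun (c : Nat) =>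
            wprod data c N r)) := by
      apply flatMap_congr'
      intro r hr
      apply List.map_congr_left
      intro c _
      rw [if_pos (by simp only [List.mem_range] at hr; omega)]
    rw [hhead, foldl_max_swap (fun (r c : Nat) => wprod data c N r)]


-- ===== VERDICT (by name: the statement is the Claim_ definition above) =====
theorem f_v_spec : Claim_equal_f_v := by
  intro data nNumber _ _
  unfold Spec_f_v
  exact main_eq data nNumber
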